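-- pv_equiv track=rewrite | github.com/cyberthreatgurl/GmailJobTracker | scripts/cleanup_icims_sender_company.py | is_ats_subdomain
-- ===== SOURCE A (Python) =====
-- ATS_ROOTS = [
--     "icims.com",
--     "workday.com",
--     "greenhouse-mail.io",
--     "lever.co",
--     "indeed.com",
-- ]
--
-- def is_ats_subdomain(domain: str) -> bool:
--     if not domain:
--         return False
--     domain = domain.lower()
--     for root in ATS_ROOTS:
--         if domain == root or domain.endswith("." + root):
--             return True
--     return False
-- ===== SOURCE B (Python) =====
-- ATS_ROOTS = [
--     "icims.com",
--     "workday.com",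
--     "greenhouse-mail.io",
--     "lever.co",
--     "indeed.com",
-- ]
--
-- _ATS_SET = set(ATS_ROOTS)
--
-- def is_ats_subdomain(domain: str) -> bool:
--     d = domain.lower()
--     while d:
--         if d in _ATS_SET:
--             return True
--         dot = d.find(".")
--         if dot == -1:
--             return False
--         d = d[dot + 1:]
--     return False
-- ===== Notes on version B (the rewrite author's own statement) =====
-- stated objective: alternative
-- what changed: B walks the lowercased domain's labels, repeatedly testing the current whole-label suffix for membership in a precomputed set of ATS roots and dropping the leading label, instead of A's loop over every root doing == / endswith checks.
import Mathlib
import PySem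

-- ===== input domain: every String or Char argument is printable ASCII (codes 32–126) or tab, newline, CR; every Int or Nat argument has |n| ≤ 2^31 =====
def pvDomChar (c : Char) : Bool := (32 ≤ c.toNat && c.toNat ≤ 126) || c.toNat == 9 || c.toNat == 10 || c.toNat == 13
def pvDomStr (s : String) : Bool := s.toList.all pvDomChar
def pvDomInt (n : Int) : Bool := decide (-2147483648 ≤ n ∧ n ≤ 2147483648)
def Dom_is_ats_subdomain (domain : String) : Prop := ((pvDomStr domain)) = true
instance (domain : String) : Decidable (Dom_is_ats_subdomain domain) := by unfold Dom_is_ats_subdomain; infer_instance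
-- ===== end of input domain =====

-- B walks the domain's labels (dropping one leading label per step) and tests set
-- membership, instead of A's per-root endswith loop; objective: alternative (same cost).

-- ===== PORT A =====
def atsRoots : List String :=
  ["icims.com", "workday.com", "greenhouse-mail.io", "lever.co", "indeed.com"]

-- A's for-loop over ATS_ROOTS with early return
def isAtsLoop (d : String) : List String → Bool
  | [] => false
  | root :: rest =>
      if d == root || PySem.Str.endswith d ("." ++ root) then true
      else isAtsLoop d rest

def is_ats_subdomain (domain : String) : Bool :=
  if domain == "" then false
  else isAtsLoop (PySem.Str.lower domain) atsRoots

-- ===== PORT B =====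
-- _ATS_SET = set(ATS_ROOTS); strings handled as their char lists (String ↔ List Char bridge)
def atsSet : PySem.Set (List Char) := PySem.Set.ofList (atsRoots.map String.toList)

-- Source B's while-loop: d in set? else drop through the first '.'
def altGo (d : List Char) : Bool :=
  if _h0 : d.isEmpty then false
  else if _h1 : PySem.Set.contains atsSet d then true
  else if _h2 : PySem.Chars.find d ['.'] == -1 then false
  else altGo (PySem.List.slice d (some (PySem.Chars.find d ['.'] + 1)) none)
termination_by d.length
decreasing_by
  have hf := PySem.Chars.neg_one_le_find d ['.']
  have hne : PySem.Chars.find d ['.'] ≠ -1 := by simpa using _h2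
  have hlen : d.length ≠ 0 := by
    simpa [List.isEmpty_iff_length_eq_zero] using _h0
  rw [PySem.List.slice_from _ (by omega)]
  simp only [List.length_drop]
  omega

def is_ats_subdomain_alt (domain : String) : Bool :=
  altGo (PySem.Chars.lower domain.toList)

-- ===== PRECONDITION & SPEC =====
def Spec_is_ats_subdomain (domain : String) (out : Bool) : Prop := out = is_ats_subdomain_alt domain
instance (domain : String) (out : Bool) : Decidable (Spec_is_ats_subdomain domain out) := by unfold Spec_is_ats_subdomain; infer_instance

-- ===== CLAIM (what is proved, stated in full; the proofs are below) =====
def Claim_equal_is_ats_subdomain : Prop := ∀ (domain : String), Dom_is_ats_subdomain domain → Spec_is_ats_subdomain domain (is_ats_subdomain domain)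

-- ===== LEMMAS AND PROOFS =====

-- a suffix of the form '.' ++ r sits past the first dot: with p dot-free,
-- '.'::r is a suffix of p ++ '.'::t iff r = t or '.'::r is a suffix of t
theorem dot_suffix {p t r : List Char} (hp : '.' ∉ p) :
    ('.' :: r <:+ p ++ '.' :: t) ↔ (r = t ∨ '.' :: r <:+ t) := by
  constructor
  · rintro ⟨u, hu⟩
    rcases List.append_eq_append_iff.mp hu with ⟨a, ha1, ha2⟩ | ⟨c, hc1, hc2⟩
    · cases a with
      | nil => left; simpa using ha2
      | cons x a' =>
          exfalso
          have hx : x = '.' := by simpa using (congrArg (·.head?) ha2).symm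
          exact hp (ha1 ▸ List.mem_append_right u (hx ▸ List.mem_cons_self))
    · cases c with
      | nil => left; simpa using hc2.symm
      | cons x c' =>
          right
          have ht : t = c' ++ '.' :: r := (by simpa using hc2 : '.' = x ∧ t = c' ++ '.' :: r).2
          exact ht ▸ ⟨c', rfl⟩
  · rintro (rfl | ⟨u, hu⟩)
    · exact ⟨p, rfl⟩
    · exact ⟨p ++ '.' :: u, by simp [hu]⟩

theorem altGo_eq (dl : List Char) :
    altGo dl = (atsRoots.map String.toList).any
      (fun r => (dl == r) || PySem.Chars.endswith dl ('.' :: r)) := by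
  fun_induction altGo dl with
  | case1 d h0 =>
      have hd : d = [] := by simpa using h0
      subst hd
      decide
  | case2 d h0 h1 =>
      have hmem : d ∈ atsRoots.map String.toList := by
        simpa [atsSet, PySem.Set.mem_ofList] using (PySem.Set.contains_iff atsSet d).mp h1
      rw [eq_comm, List.any_eq_true]
      exact ⟨d, hmem, by simp⟩
  | case3 d h0 h1 h2 =>
      have hnodot : '.' ∉ d := by
        have hf : PySem.Chars.find d ['.'] = -1 := by simpa using h2
        have hninf := (PySem.Chars.find_eq_neg_one_iff d ['.']).mp hf
        intro hm
        rcases List.append_of_mem hm with ⟨s, t, rfl⟩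
        exact hninf ⟨s, t, by simp⟩
      have hnm : d ∉ atsRoots.map String.toList := fun hm =>
        h1 ((PySem.Set.contains_iff atsSet d).mpr
          (by simpa [atsSet, PySem.Set.mem_ofList] using hm))
      rw [eq_comm, List.any_eq_false]
      intro r hr
      simp only [Bool.or_eq_true, beq_iff_eq, PySem.Chars.endswith_iff]
      push Not
      refine ⟨fun e => hnm (e ▸ hr), fun hs => hnodot ?_⟩
      exact List.Sublist.mem (by simp) hs.sublist
  | case4 d h0 h1 h2 ih =>
      have hf0 : 0 ≤ PySem.Chars.find d ['.'] := by
        have h1' := PySem.Chars.neg_one_le_find d ['.']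
        have h2' : PySem.Chars.find d ['.'] ≠ -1 := by simpa using h2
        omega
      obtain ⟨hpre, hmin⟩ := PySem.Chars.find_spec hf0
      obtain ⟨s, hs⟩ := hpre
      have hdn : List.drop (PySem.Chars.find d ['.']).toNat d
          = '.' :: List.drop ((PySem.Chars.find d ['.']).toNat + 1) d := by
        rw [← List.tail_drop, ← hs]; rfl
      have hsplit : d = List.take (PySem.Chars.find d ['.']).toNat d
          ++ '.' :: List.drop ((PySem.Chars.find d ['.']).toNat + 1) d := by
        conv_lhs => rw [← List.take_append_drop (PySem.Chars.find d ['.']).toNat d, hdn]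
      have hp : '.' ∉ List.take (PySem.Chars.find d ['.']).toNat d := by
        intro hm
        obtain ⟨i, hi, hgi⟩ := List.mem_iff_getElem.mp hm
        have hilen : i < d.length := lt_of_lt_of_le hi (by simp [List.length_take])
        have hik : i < (PySem.Chars.find d ['.']).toNat := by
          simp [List.length_take] at hi; omega
        refine hmin i hik ⟨List.drop (i + 1) d, ?_⟩
        have := List.getElem_cons_drop hilen
        rw [← this]
        have : d[i] = '.' := by rw [← hgi]; simp [List.getElem_take]
        simp [this]
      have hslice : PySem.List.slice d (some (PySem.Chars.find d ['.'] + 1)) none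
          = List.drop ((PySem.Chars.find d ['.']).toNat + 1) d := by
        rw [PySem.List.slice_from _ (by omega)]
        congr 1
        omega
      rw [hslice] at ih
      rw [hslice, ih]
      have hnm : d ∉ atsRoots.map String.toList := fun hm =>
        h1 ((PySem.Set.contains_iff atsSet d).mpr
          (by simpa [atsSet, PySem.Set.mem_ofList] using hm))
      apply Bool.eq_iff_iff.mpr
      simp only [List.any_eq_true, Bool.or_eq_true, beq_iff_eq, PySem.Chars.endswith_iff]
      constructor
      · rintro ⟨r, hr, h⟩
        refine ⟨r, hr, Or.inr ?_⟩
        rw [hsplit]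
        refine (dot_suffix hp).mpr ?_
        rcases h with h | h
        · exact Or.inl h.symm
        · exact Or.inr h
      · rintro ⟨r, hr, h | h⟩
        · exact absurd hr (h ▸ hnm)
        · have := (dot_suffix hp).mp (hsplit ▸ h)
          refine ⟨r, hr, ?_⟩
          rcases this with h' | h'
          · exact Or.inl h'.symm
          · exact Or.inr h'

theorem isAtsLoop_eq (d : String) (roots : List String) :
    isAtsLoop d roots = roots.any (fun root => d == root || PySem.Str.endswith d ("." ++ root)) := by
  induction roots with
  | nil => rfl
  | cons root rest ih =>
      rw [isAtsLoop, List.any_cons, ← ih]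
      cases h : (d == root || PySem.Str.endswith d ("." ++ root)) <;>
        simp only [if_true, Bool.false_or, Bool.true_or, Bool.false_eq_true, if_false]

-- ===== VERDICT (by name: the statement is the Claim_ definition above) =====
theorem is_ats_subdomain_spec : Claim_equal_is_ats_subdomain := by
  intro domain _
  unfold Spec_is_ats_subdomain is_ats_subdomain is_ats_subdomain_alt
  by_cases hd : domain = ""
  · subst hd
    have h0 : PySem.Chars.lower ("" : String).toList = [] := rfl
    rw [h0, altGo]
    simp
  · have hbeq : (domain == "") = false := by simpa using hd
    simp only [hbeq, Bool.false_eq_true, if_false]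
    rw [isAtsLoop_eq, altGo_eq, List.any_map,
        show PySem.Chars.lower domain.toList = (PySem.Str.lower domain).toList from
          (PySem.Str.toList_lower domain).symm]
    refine List.any_congr rfl fun root => ?_
    apply Bool.eq_iff_iff.mpr
    simp [PySem.Chars.endswith_iff, String.ext_iff]
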